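-- pv_equiv track=rewrite | github.com/kucheran101/ensguard | ensguard.py | gen_confusables
-- ===== SOURCE A (Python) =====
-- from typing import Dict, Iterable, List, Optional, Set, Tuple
--
-- CONFUSABLES: Dict[str, List[str]] = {
--     "a": ["\u0430"],  # Cyrillic a
--     "c": ["\u0441"],  # Cyrillic es
--     "e": ["\u0435"],  # Cyrillic ie
--     "i": ["\u0456"],  # Cyrillic i
--     "j": ["\u0458"],  # Cyrillic je
--     "o": ["\u043e", "\u03bf"],  # Cyrillic o, Greek omicron
--     "p": ["\u0440"],  # Cyrillic er
--     "s": ["\u0455"],  # Cyrillic dze (looks like s)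
--     "x": ["\u0445", "\u03c7"],  # Cyrillic ha, Greek chi
--     "y": ["\u0443"],  # Cyrillic u (looks like y in Latin)
--     "h": ["\u043d"],  # Cyrillic en
--     "k": ["\u043a"],  # Cyrillic ka
--     "m": ["\u043c"],  # Cyrillic em
--     "t": ["\u0442"],  # Cyrillic te
--     "b": ["\u0463"],  # Cyrillic yat (approx)
--     "g": ["\u0261"],  # Latin small script g
--     "l": ["\u04cf", "\u0131"],  # Cyrillic palochka, Latin dotless i
--     "u": ["\u044e"],  # Cyrillic yu (loose)
--     "n": ["\u0578"],  # Armenian o (visually n/o-ish for some fonts)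
--     "v": ["\u03bd"],  # Greek nu
--     "r": ["\u0433"],  # Cyrillic ge (loose)
--     "w": ["\u051d"],  # Cyrillic we
--     "f": ["\u017f"],  # Long s (historical), looks f-ish in some fonts
--     "q": ["\u051b"],  # Cyrillic qa
--     "z": ["\u01b6"],  # z with stroke
--     "d": ["\u0501"],  # Cyrillic komi dze
--     "0": ["o", "\u043e"],  # zero vs o
--     "1": ["l", "i", "\u04cf", "\u0131"],
--     "3": ["\u0437"],  # Cyrillic ze looks like 3
--     "5": ["\u0455"],  # looks like s
-- }
--
-- def gen_confusables(base: str, max_per_letter: int = 2) -> Set[str]: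
--     out: Set[str] = set()
--     chars = list(base)
--     for i, ch in enumerate(chars):
--         reps = CONFUSABLES.get(ch, [])[:max_per_letter]
--         for r in reps:
--             alt = chars.copy()
--             alt[i] = r
--             out.add("".join(alt))
--     # two-position replacements (combinatorial but capped)
--     for i, ch1 in enumerate(chars):
--         r1s = CONFUSABLES.get(ch1, [])[:1]
--         for j in range(i+1, len(chars)):
--             ch2 = chars[j]
--             r2s = CONFUSABLES.get(ch2, [])[:1]
--             for r1 in r1s:
--                 for r2 in r2s:
--                     alt = chars.copy()
--                     alt[i], alt[j] = r1, r2
--                     out.add("".join(alt))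
--     return out
-- ===== SOURCE B (Python) =====
-- from typing import Dict, List, Set
--
-- CONFUSABLES: Dict[str, List[str]] = {
--     "a": ["\u0430"],
--     "c": ["\u0441"],
--     "e": ["\u0435"],
--     "i": ["\u0456"],
--     "j": ["\u0458"],
--     "o": ["\u043e", "\u03bf"],
--     "p": ["\u0440"],
--     "s": ["\u0455"],
--     "x": ["\u0445", "\u03c7"],
--     "y": ["\u0443"],
--     "h": ["\u043d"],
--     "k": ["\u043a"],
--     "m": ["\u043c"],
--     "t": ["\u0442"],
--     "b": ["\u0463"],
--     "g": ["\u0261"],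
--     "l": ["\u04cf", "\u0131"],
--     "u": ["\u044e"],
--     "n": ["\u0578"],
--     "v": ["\u03bd"],
--     "r": ["\u0433"],
--     "w": ["\u051d"],
--     "f": ["\u017f"],
--     "q": ["\u051b"],
--     "z": ["\u01b6"],
--     "d": ["\u0501"],
--     "0": ["o", "\u043e"],
--     "1": ["l", "i", "\u04cf", "\u0131"],
--     "3": ["\u0437"],
--     "5": ["\u0455"],
-- }
--
-- def gen_confusables(base: str, max_per_letter: int = 2) -> Set[str]:
--     chars = list(base)
--     # single-position variants, built by slicing
--     singles = ["".join(chars[:i] + [r] + chars[i+1:])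
--                for i, ch in enumerate(chars)
--                for r in CONFUSABLES.get(ch, [])[:max_per_letter]]
--     # positions that have a confusable, each with its first replacement
--     subs = [(i, r) for i, ch in enumerate(chars) for r in CONFUSABLES.get(ch, [])[:1]]
--     # two-position variants: all ordered pairs drawn from subs
--     pairs = []
--     rest = subs
--     while rest:
--         (i, r1), rest = rest[0], rest[1:]
--         for j, r2 in rest:
--             pairs.append("".join(chars[:i] + [r1] + chars[i+1:j] + [r2] + chars[j+1:]))
--     return set(singles + pairs)
-- ===== Notes on version B (the rewrite author's own statement) =====
-- stated objective: alternative
-- what changed: A's pair phase scans all index pairs (i,j) with a dict lookup and slice per inner step; B first builds the list of substitutable positions with their first confusable in one pass, then pairs the entries of that list, and singles/pairs are built by list slicing and collected into the set at the end instead of incremental adds.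
import Mathlib
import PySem

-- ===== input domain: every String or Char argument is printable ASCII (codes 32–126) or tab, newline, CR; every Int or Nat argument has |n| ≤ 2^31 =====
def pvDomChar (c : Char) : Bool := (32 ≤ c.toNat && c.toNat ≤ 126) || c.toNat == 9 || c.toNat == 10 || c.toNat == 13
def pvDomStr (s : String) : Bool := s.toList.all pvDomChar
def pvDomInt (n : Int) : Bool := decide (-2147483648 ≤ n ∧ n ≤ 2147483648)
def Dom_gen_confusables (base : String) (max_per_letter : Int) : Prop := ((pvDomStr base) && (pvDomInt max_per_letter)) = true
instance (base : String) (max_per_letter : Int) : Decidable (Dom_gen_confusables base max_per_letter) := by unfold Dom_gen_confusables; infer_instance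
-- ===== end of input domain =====

-- B replaces A's quadratic scan over all index pairs (with per-pair dict lookups) by one pass
-- collecting the substitutable positions, then pairing those; objective: alternative decomposition.

-- ===== PORT A =====
-- CONFUSABLES: keys are 1-character strings, values lists of 1-character strings → Char / List Char.
def pvCONFUSABLES : PySem.Dict Char (List Char) := PySem.Dict.mk
  [('a', ['\u0430']), ('c', ['\u0441']), ('e', ['\u0435']), ('i', ['\u0456']),
   ('j', ['\u0458']), ('o', ['\u043e', '\u03bf']), ('p', ['\u0440']), ('s', ['\u0455']),
   ('x', ['\u0445', '\u03c7']), ('y', ['\u0443']), ('h', ['\u043d']), ('k', ['\u043a']),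
   ('m', ['\u043c']), ('t', ['\u0442']), ('b', ['\u0463']), ('g', ['\u0261']),
   ('l', ['\u04cf', '\u0131']), ('u', ['\u044e']), ('n', ['\u0578']), ('v', ['\u03bd']),
   ('r', ['\u0433']), ('w', ['\u051d']), ('f', ['\u017f']), ('q', ['\u051b']),
   ('z', ['\u01b6']), ('d', ['\u0501']), ('0', ['o', '\u043e']),
   ('1', ['l', 'i', '\u04cf', '\u0131']), ('3', ['\u0437']), ('5', ['\u0455'])]

def gen_confusables (base : String) (max_per_letter : Int) : List String :=
  let chars := base.toList
  let out : PySem.Set String := PySem.Set.empty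
  -- single-position replacements
  let out := (PySem.List.enumerate chars).foldl (fun out e =>
    let reps := PySem.List.slice (PySem.Dict.getD pvCONFUSABLES e.2 []) none (some max_per_letter)
    reps.foldl (fun out r =>
      PySem.Set.add out (String.ofList (PySem.List.pySetD chars e.1 r))) out) out
  -- two-position replacements
  let out := (PySem.List.enumerate chars).foldl (fun out e =>
    let r1s := PySem.List.slice (PySem.Dict.getD pvCONFUSABLES e.2 []) none (some 1)
    (PySem.List.pyRange (e.1 + 1) (chars.length : Int) 1).foldl (fun out j =>
      -- ch2 = chars[j]; exact: e.1 + 1 ≤ j < len(chars), so the index is in range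
      let ch2 := PySem.List.pyGetD chars j ' '
      let r2s := PySem.List.slice (PySem.Dict.getD pvCONFUSABLES ch2 []) none (some 1)
      r1s.foldl (fun out r1 => r2s.foldl (fun out r2 =>
        PySem.Set.add out
          (String.ofList (PySem.List.pySetD (PySem.List.pySetD chars e.1 r1) j r2))) out) out) out) out
  out

-- ===== PORT B =====
-- '"".join(chars[:i] + [r1] + chars[i+1:j] + [r2] + chars[j+1:])' for successive pairs of subs
def pvPairsOf (chars : List Char) : List (Int × Char) → List String
  | [] => []
  | p :: rest =>
      rest.map (fun q => String.ofList
        (PySem.List.slice chars none (some p.1) ++ [p.2] ++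
         PySem.List.slice chars (some (p.1 + 1)) (some q.1) ++ [q.2] ++
         PySem.List.slice chars (some (q.1 + 1)) none)) ++ pvPairsOf chars rest

def gen_confusables_alt (base : String) (max_per_letter : Int) : List String :=
  let chars := base.toList
  let singles := (PySem.List.enumerate chars).flatMap (fun e =>
    (PySem.List.slice (PySem.Dict.getD pvCONFUSABLES e.2 []) none (some max_per_letter)).map
      (fun r => String.ofList (PySem.List.slice chars none (some e.1) ++ [r] ++
                           PySem.List.slice chars (some (e.1 + 1)) none)))
  let subs := (PySem.List.enumerate chars).flatMap (fun e =>
    (PySem.List.slice (PySem.Dict.getD pvCONFUSABLES e.2 []) none (some 1)).map (fun r => (e.1, r)))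
  PySem.Set.ofList (singles ++ pvPairsOf chars subs)

-- ===== PRECONDITION & SPEC =====
def Spec_gen_confusables (base : String) (max_per_letter : Int) (out : List String) : Prop := out = gen_confusables_alt base max_per_letter
instance (base : String) (max_per_letter : Int) (out : List String) : Decidable (Spec_gen_confusables base max_per_letter out) := by unfold Spec_gen_confusables; infer_instance

-- ===== CLAIM (what is proved, stated in full; the proofs are below) =====
def Claim_equal_gen_confusables : Prop := ∀ (base : String) (max_per_letter : Int), Dom_gen_confusables base max_per_letter → Spec_gen_confusables base max_per_letter (gen_confusables base max_per_letter)

-- ===== LEMMAS AND PROOFS =====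

-- Abbreviations for the pieces of both ports (proof-side only)
def pvT1 (ch : Char) : List Char :=
  PySem.List.slice (PySem.Dict.getD pvCONFUSABLES ch []) none (some 1)

def pvS (e : Int × Char) : List (Int × Char) := (pvT1 e.2).map (fun r => (e.1, r))

def pvStr2 (chars : List Char) (i : Int) (r1 : Char) (j : Int) (r2 : Char) : String :=
  String.ofList (PySem.List.slice chars none (some i) ++ [r1] ++
    PySem.List.slice chars (some (i + 1)) (some j) ++ [r2] ++
    PySem.List.slice chars (some (j + 1)) none)

def pvSinglesA (chars : List Char) (m : Int) : List String :=
  (PySem.List.enumerate chars).flatMap (fun e =>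
    (PySem.List.slice (PySem.Dict.getD pvCONFUSABLES e.2 []) none (some m)).map
      (fun r => String.ofList (PySem.List.pySetD chars e.1 r)))

def pvSinglesB (chars : List Char) (m : Int) : List String :=
  (PySem.List.enumerate chars).flatMap (fun e =>
    (PySem.List.slice (PySem.Dict.getD pvCONFUSABLES e.2 []) none (some m)).map
      (fun r => String.ofList (PySem.List.slice chars none (some e.1) ++ [r] ++
                               PySem.List.slice chars (some (e.1 + 1)) none)))

def pvPairsA (chars : List Char) : List String :=
  (PySem.List.enumerate chars).flatMap (fun e =>
    (PySem.List.pyRange (e.1 + 1) (chars.length : Int) 1).flatMap (fun j =>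
      (pvT1 e.2).flatMap (fun r1 =>
        (pvT1 (PySem.List.pyGetD chars j ' ')).map (fun r2 =>
          String.ofList (PySem.List.pySetD (PySem.List.pySetD chars e.1 r1) j r2)))))

def pvSubsFrom (chars : List Char) (t : Nat) : List (Int × Char) :=
  (PySem.List.enumerate (chars.drop t) (t : Int)).flatMap pvS

theorem pvT1_len (ch : Char) : (pvT1 ch).length ≤ 1 := by
  unfold pvT1
  rw [PySem.List.slice_to _ (by norm_num : (0:Int) ≤ 1)]
  simp [List.length_take]

theorem pvFlatMapComm {α β γ : Type} (L : List α) (u : List β) (hu : u.length ≤ 1)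
    (M : α → β → List γ) :
    L.flatMap (fun x => u.flatMap (fun y => M x y)) =
      u.flatMap (fun y => L.flatMap (fun x => M x y)) := by
  match u with
  | [] => simp
  | [y] => simp
  | y1 :: y2 :: v => simp at hu

-- A's shape: the two foldl phases are foldl-of-add over explicit candidate lists
theorem pvShapeA (base : String) (m : Int) :
    gen_confusables base m =
      (pvSinglesA base.toList m ++ pvPairsA base.toList).foldl PySem.Set.add [] := by
  simp only [gen_confusables, pvSinglesA, pvPairsA, pvT1, List.foldl_append,
    List.foldl_flatMap, List.foldl_map]
  rfl

-- B's shape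
theorem pvShapeB (base : String) (m : Int) :
    gen_confusables_alt base m =
      (pvSinglesB base.toList m ++
        pvPairsOf base.toList ((PySem.List.enumerate base.toList).flatMap pvS)).foldl
        PySem.Set.add [] := by
  simp only [gen_confusables_alt, pvSinglesB, PySem.Set.ofList_eq_foldl]
  rfl

-- single-position strings agree
theorem pvStr1_eq (chars : List Char) (a : Nat) (r : Char) (ha : a < chars.length) :
    String.ofList (PySem.List.pySetD chars (a : Int) r) =
      String.ofList (PySem.List.slice chars none (some (a : Int)) ++ [r] ++
        PySem.List.slice chars (some ((a : Int) + 1)) none) := by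
  have h1 : PySem.List.pySetD chars (a : Int) r = chars.set a r := by
    simp [PySem.List.pySetD, PySem.List.pySet?_natCast chars a r ha]
  have h2 : ((a : Int) + 1) = ((a + 1 : Nat) : Int) := by push_cast; ring
  rw [h1, PySem.List.slice_to_natCast, h2, PySem.List.slice_from_natCast,
    List.set_eq_take_cons_drop r ha]
  simp

-- two-position strings agree
theorem pvStr2_eq (chars : List Char) (a b : Nat) (r1 r2 : Char)
    (hab : a < b) (hb : b < chars.length) :
    String.ofList (PySem.List.pySetD (PySem.List.pySetD chars (a : Int) r1) (b : Int) r2) =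
      pvStr2 chars (a : Int) r1 (b : Int) r2 := by
  have hb' : b < (chars.set a r1).length := by simpa using hb
  have h1 : PySem.List.pySetD chars (a : Int) r1 = chars.set a r1 := by
    simp [PySem.List.pySetD, PySem.List.pySet?_natCast chars a r1 (lt_trans hab hb)]
  have h2 : PySem.List.pySetD (chars.set a r1) (b : Int) r2 = (chars.set a r1).set b r2 := by
    simp [PySem.List.pySetD, PySem.List.pySet?_natCast (chars.set a r1) b r2 hb']
  have ha1 : ((a : Int) + 1) = ((a + 1 : Nat) : Int) := by push_cast; ring
  have hb1 : ((b : Int) + 1) = ((b + 1 : Nat) : Int) := by push_cast; ring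
  have hmid : a < (List.take b chars).length := by simp [List.length_take]; omega
  rw [h1, h2]
  unfold pvStr2
  rw [PySem.List.slice_to_natCast, ha1, hb1, PySem.List.slice_natCast,
    PySem.List.slice_from_natCast, List.set_eq_take_cons_drop r2 hb', List.take_set,
    List.drop_set_of_lt (by omega : a < b + 1), List.set_eq_take_cons_drop r1 hmid,
    List.take_take, min_eq_left (le_of_lt hab), List.drop_take]
  simp [List.append_assoc]

theorem pvSingles_eq (chars : List Char) (m : Int) :
    pvSinglesA chars m = pvSinglesB chars m := by
  unfold pvSinglesA pvSinglesB
  refine List.flatMap_congr (fun e he => ?_)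
  rcases (PySem.List.mem_enumerate_iff chars 0 e).mp he with ⟨k, hk, rfl⟩
  refine List.map_congr_left (fun r _ => ?_)
  simpa using pvStr1_eq chars k r hk

-- range loop over chars[j] = loop over the enumerated suffix
theorem pvRangeEnum {γ : Type} (cs : List Char) (F : Int → Char → List γ) :
    ∀ (d t : Nat), cs.length - t = d →
      (PySem.List.pyRange (t : Int) (cs.length : Int) 1).flatMap
          (fun j => F j (PySem.List.pyGetD cs j ' ')) =
        (PySem.List.enumerate (cs.drop t) (t : Int)).flatMap (fun e => F e.1 e.2) := by
  intro d
  induction d with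
  | zero =>
      intro t ht
      rw [PySem.List.pyRange_one_eq_nil (by omega : (cs.length : Int) ≤ (t : Int)),
        List.drop_eq_nil_of_le (by omega), PySem.List.enumerate_nil]
      simp
  | succ d ih =>
      intro t ht
      have htl : t < cs.length := by omega
      rw [PySem.List.pyRange_one_cons (by exact_mod_cast htl),
        List.drop_eq_getElem_cons htl, PySem.List.enumerate_cons]
      simp only [List.flatMap_cons]
      congr 1
      · congr 1
        rw [PySem.List.pyGetD_natCast, List.getD_eq_getElem cs ' ' htl]
      · have hc : ((t : Int) + 1) = ((t + 1 : Nat) : Int) := by push_cast; ring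
        rw [hc, ih (t + 1) (by omega)]

-- the tails recursion: pairing each position with the substitutable suffix
theorem pvTailsD (chars : List Char) :
    ∀ (cs : List Char) (k : Nat), cs = chars.drop k →
      (PySem.List.enumerate cs (k : Int)).flatMap (fun e =>
          (pvS e).flatMap (fun p =>
            (pvSubsFrom chars ((e.1 + 1).toNat)).map
              (fun q => pvStr2 chars p.1 p.2 q.1 q.2))) =
        pvPairsOf chars ((PySem.List.enumerate cs (k : Int)).flatMap pvS) := by
  intro cs
  induction cs with
  | nil => intro k hk; rw [PySem.List.enumerate_nil]; simp [pvPairsOf]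
  | cons c t ih =>
      intro k hk
      have hdrop : t = chars.drop (k + 1) := by
        have := congrArg (List.drop 1) hk.symm
        simpa [List.drop_drop, Nat.add_comm] using this.symm
      have hc : ((k : Int) + 1) = ((k + 1 : Nat) : Int) := by push_cast; ring
      rw [PySem.List.enumerate_cons]
      simp only [List.flatMap_cons]
      rw [hc, ih (k + 1) hdrop]
      have hsubs : pvSubsFrom chars (((k + 1 : Nat) : Int).toNat) =
          (PySem.List.enumerate t ((k + 1 : Nat) : Int)).flatMap pvS := by
        have : ((k + 1 : Nat) : Int).toNat = k + 1 := by omega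
        rw [this]
        unfold pvSubsFrom
        rw [← hdrop]
      simp only [hsubs]
      -- case on whether position k has a replacement
      have hlen := pvT1_len c
      rcases hu : pvT1 c with _ | ⟨r, v⟩
      · simp [pvS, hu]
      · have hv : v = [] := by
          rw [hu] at hlen; simpa using hlen
        subst hv
        simp [pvS, hu, pvPairsOf, pvStr2]

theorem pvPairs_eq (chars : List Char) :
    pvPairsA chars = pvPairsOf chars ((PySem.List.enumerate chars).flatMap pvS) := by
  unfold pvPairsA
  have step : (PySem.List.enumerate chars).flatMap (fun e =>
      (PySem.List.pyRange (e.1 + 1) (chars.length : Int) 1).flatMap (fun j =>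
        (pvT1 e.2).flatMap (fun r1 =>
          (pvT1 (PySem.List.pyGetD chars j ' ')).map (fun r2 =>
            String.ofList (PySem.List.pySetD (PySem.List.pySetD chars e.1 r1) j r2))))) =
      (PySem.List.enumerate chars).flatMap (fun e =>
        (pvS e).flatMap (fun p =>
          (pvSubsFrom chars ((e.1 + 1).toNat)).map
            (fun q => pvStr2 chars p.1 p.2 q.1 q.2))) := by
    refine List.flatMap_congr (fun e he => ?_)
    rcases (PySem.List.mem_enumerate_iff chars 0 e).mp he with ⟨k, hk, rfl⟩
    simp only [zero_add]
    -- rewrite the built strings (indices are in range)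
    have h1 : (PySem.List.pyRange ((k : Int) + 1) (chars.length : Int) 1).flatMap (fun j =>
        (pvT1 (chars[k])).flatMap (fun r1 =>
          (pvT1 (PySem.List.pyGetD chars j ' ')).map (fun r2 =>
            String.ofList (PySem.List.pySetD (PySem.List.pySetD chars (k : Int) r1) j r2)))) =
        (PySem.List.pyRange ((k : Int) + 1) (chars.length : Int) 1).flatMap (fun j =>
          (pvT1 (chars[k])).flatMap (fun r1 =>
            (pvT1 (PySem.List.pyGetD chars j ' ')).map (fun r2 =>
              pvStr2 chars (k : Int) r1 j r2))) := by
      refine List.flatMap_congr (fun j hj => ?_)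
      rcases PySem.List.mem_pyRange_one.mp hj with ⟨hj1, hj2⟩
      have hb : j = (j.toNat : Int) := by omega
      refine List.flatMap_congr (fun r1 _ => ?_)
      refine List.map_congr_left (fun r2 _ => ?_)
      rw [hb]
      exact pvStr2_eq chars k j.toNat r1 r2 (by omega) (by omega)
    rw [h1, pvFlatMapComm _ _ (pvT1_len _)]
    have hc : ((k : Int) + 1) = ((k + 1 : Nat) : Int) := by push_cast; ring
    have h2 : ∀ r1 : Char,
        (PySem.List.pyRange ((k : Int) + 1) (chars.length : Int) 1).flatMap (fun j =>
          (pvT1 (PySem.List.pyGetD chars j ' ')).map (fun r2 => pvStr2 chars (k : Int) r1 j r2)) =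
        (pvSubsFrom chars (k + 1)).map (fun q => pvStr2 chars (k : Int) r1 q.1 q.2) := by
      intro r1
      rw [hc, pvRangeEnum chars
        (fun j ch => (pvT1 ch).map (fun r2 => pvStr2 chars (k : Int) r1 j r2))
        (chars.length - (k + 1)) (k + 1) rfl]
      unfold pvSubsFrom
      rw [List.map_flatMap]
      refine List.flatMap_congr (fun e2 _ => ?_)
      simp [pvS, List.map_map, Function.comp]
    have h3 : ((k : Int) + 1).toNat = k + 1 := by omega
    rw [h3]
    calc (pvT1 chars[k]).flatMap (fun r1 =>
            (PySem.List.pyRange ((k : Int) + 1) (chars.length : Int) 1).flatMap (fun j =>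
              (pvT1 (PySem.List.pyGetD chars j ' ')).map (fun r2 => pvStr2 chars (k : Int) r1 j r2)))
        = (pvT1 chars[k]).flatMap (fun r1 =>
            (pvSubsFrom chars (k + 1)).map (fun q => pvStr2 chars (k : Int) r1 q.1 q.2)) := by
          exact List.flatMap_congr (fun r1 _ => h2 r1)
      _ = (pvS ((k : Int), chars[k])).flatMap (fun p =>
            (pvSubsFrom chars (k + 1)).map (fun q => pvStr2 chars p.1 p.2 q.1 q.2)) := by
          simp [pvS, List.flatMap_map]
  rw [step]
  have := pvTailsD chars chars 0 (by simp)
  simpa using this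

theorem gen_confusables_lists_eq (base : String) (m : Int) :
    gen_confusables base m = gen_confusables_alt base m := by
  rw [pvShapeA, pvShapeB, pvSingles_eq, pvPairs_eq]

-- ===== VERDICT (by name: the statement is the Claim_ definition above) =====
theorem gen_confusables_spec : Claim_equal_gen_confusables := by
  intro base m _
  exact gen_confusables_lists_eq base m
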